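-- pv_equiv track=rewrite | github.com/Zachanardo/Intellicrack | intellicrack/ai/visualization_analytics.py | _calculate_overall_efficiency
-- ===== SOURCE A (Python) =====
-- from typing import TYPE_CHECKING, Any
--
-- def _calculate_overall_efficiency(efficiency_analysis: dict[str, dict[str, Any]]) -> str:
--     """Calculate overall efficiency rating."""
--     ratings = [analysis["efficiency_rating"] for analysis in efficiency_analysis.values()]
--
--     if "concerning" in ratings:
--         return "needs_optimization"
--     if "high_usage" in ratings:
--         return "monitor_closely"
--     if all(r in ["optimal", "good"] for r in ratings):
--         return "excellent"
--     return "good"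
-- ===== SOURCE B (Python) =====
-- def _severity(rating):
--     """Numeric severity of a single efficiency rating (0 = best, 3 = worst)."""
--     if rating == "concerning":
--         return 3
--     if rating == "high_usage":
--         return 2
--     if rating in ("optimal", "good"):
--         return 0
--     return 1
--
--
-- _LABELS = ("excellent", "good", "monitor_closely", "needs_optimization")
--
--
-- def _calculate_overall_efficiency(efficiency_analysis):
--     """Calculate overall efficiency rating: worst severity wins, label by table."""
--     worst = 0
--     for analysis in efficiency_analysis.values():
--         worst = max(worst, _severity(analysis["efficiency_rating"]))
--     return _LABELS[worst]
-- ===== Notes on version B (the rewrite author's own statement) =====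
-- stated objective: alternative
-- what changed: Replaces the three staged membership/all scans over a materialized ratings list with a max-reduction: each rating is mapped to a numeric severity 0-3, one loop keeps the maximum, and the answer is a table lookup by that worst severity.
import Mathlib
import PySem

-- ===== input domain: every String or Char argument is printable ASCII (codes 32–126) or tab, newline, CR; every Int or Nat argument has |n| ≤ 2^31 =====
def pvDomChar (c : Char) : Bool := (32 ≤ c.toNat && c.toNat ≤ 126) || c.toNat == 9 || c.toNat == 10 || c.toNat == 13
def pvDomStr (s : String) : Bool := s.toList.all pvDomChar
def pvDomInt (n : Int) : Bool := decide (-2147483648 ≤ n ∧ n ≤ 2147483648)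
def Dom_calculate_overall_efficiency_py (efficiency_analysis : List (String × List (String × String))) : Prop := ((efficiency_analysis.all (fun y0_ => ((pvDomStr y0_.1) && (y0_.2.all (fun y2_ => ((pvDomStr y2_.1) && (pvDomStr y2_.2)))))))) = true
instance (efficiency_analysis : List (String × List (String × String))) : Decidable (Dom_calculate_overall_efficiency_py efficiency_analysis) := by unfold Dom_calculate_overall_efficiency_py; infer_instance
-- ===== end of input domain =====

-- B replaces A's materialized ratings list and three staged scans with a max-reduction over
-- numeric severities (0-3) and a label-table lookup (objective: alternative, same cost).


-- ===== PORT A =====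
-- analysis["efficiency_rating"]; Pre_ guarantees the key is present, so getD "" is only a
-- totalization guard for the KeyError case excluded by Pre_.
def pvRating (d : List (String × String)) : String :=
  ((PySem.Dict.mk d).get? "efficiency_rating").getD ""

def calculate_overall_efficiency_py (efficiency_analysis : List (String × List (String × String))) : String :=
  let ratings := efficiency_analysis.map (fun p => pvRating p.2)
  if ratings.contains "concerning" then "needs_optimization"
  else if ratings.contains "high_usage" then "monitor_closely"
  else if ratings.all (fun r => r == "optimal" || r == "good") then "excellent"
  else "good"

-- ===== PORT B =====
def pvSeverity (r : String) : Int :=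
  if r == "concerning" then 3
  else if r == "high_usage" then 2
  else if r == "optimal" || r == "good" then 0
  else 1

def pvLabels : List String := ["excellent", "good", "monitor_closely", "needs_optimization"]

def calculate_overall_efficiency_py_alt (efficiency_analysis : List (String × List (String × String))) : String :=
  let worst := efficiency_analysis.foldl (fun w p => max w (pvSeverity (pvRating p.2))) 0
  ((PySem.List.pyGet? pvLabels worst).getD "")  -- index is always 0..3; getD totalizes only

-- ===== PRECONDITION & SPEC =====
-- Pre_ excludes exactly the inputs where some inner dict lacks "efficiency_rating": there
-- Python A raises KeyError (and so does B).
def Pre_calculate_overall_efficiency_py (efficiency_analysis : List (String × List (String × String))) : Prop :=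
  ∀ p ∈ efficiency_analysis, ((PySem.Dict.mk p.2).get? "efficiency_rating").isSome = true
instance (efficiency_analysis : List (String × List (String × String))) : Decidable (Pre_calculate_overall_efficiency_py efficiency_analysis) := by unfold Pre_calculate_overall_efficiency_py; infer_instance
def pvWitness_calculate_overall_efficiency_py : (List (String × List (String × String))) :=
  [("cpu", [("efficiency_rating", "optimal")]), ("mem", [("efficiency_rating", "high_usage")])]

def Spec_calculate_overall_efficiency_py (efficiency_analysis : List (String × List (String × String))) (out : String) : Prop := out = calculate_overall_efficiency_py_alt efficiency_analysis
instance (efficiency_analysis : List (String × List (String × String))) (out : String) : Decidable (Spec_calculate_overall_efficiency_py efficiency_analysis out) := by unfold Spec_calculate_overall_efficiency_py; infer_instance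

-- ===== CLAIM (what is proved, stated in full; the proofs are below) =====
def Claim_equal_calculate_overall_efficiency_py : Prop := ∀ (efficiency_analysis : List (String × List (String × String))), Dom_calculate_overall_efficiency_py efficiency_analysis → Pre_calculate_overall_efficiency_py efficiency_analysis → Spec_calculate_overall_efficiency_py efficiency_analysis (calculate_overall_efficiency_py efficiency_analysis)

-- ===== LEMMAS AND PROOFS =====
theorem pvSeverity_nonneg (r : String) : 0 ≤ pvSeverity r := by
  unfold pvSeverity; split_ifs <;> omega

-- shifting the accumulator of B's max-fold out of the fold
theorem pvFold_shift (ea : List (String × List (String × String))) (i : Int) (hi : 0 ≤ i) :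
    ea.foldl (fun w p => max w (pvSeverity (pvRating p.2))) i =
      max i (ea.foldl (fun w p => max w (pvSeverity (pvRating p.2))) 0) := by
  induction ea generalizing i with
  | nil => simp [max_eq_left hi]
  | cons h t ih =>
    simp only [List.foldl_cons]
    rw [ih (max i (pvSeverity (pvRating h.2))) (le_trans hi (le_max_left _ _)),
        ih (max 0 (pvSeverity (pvRating h.2))) (le_max_left _ _),
        max_eq_right (pvSeverity_nonneg _)]
    rw [max_assoc]

-- generic shape of one step of the max-reduction against A's three staged tests
theorem pvMax_case (b1 b2 b3 X Y Z : Bool) :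
    max (if b1 = true then (3:Int) else if b2 = true then 2 else if b3 = true then 0 else 1)
        (if X = true then (3:Int) else if Y = true then 2 else if Z = true then 0 else 1) =
      (if (b1 || X) = true then (3:Int) else if (b2 || Y) = true then 2
       else if (b3 && Z) = true then 0 else 1) := by
  cases b1 <;> cases b2 <;> cases b3 <;> cases X <;> cases Y <;> cases Z <;> decide

-- B's worst severity characterised by A's three scans of the mapped ratings list
theorem pvWorst_char (ea : List (String × List (String × String))) :
    ea.foldl (fun w p => max w (pvSeverity (pvRating p.2))) 0 =
      (if (ea.map (fun p => pvRating p.2)).contains "concerning" then 3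
       else if (ea.map (fun p => pvRating p.2)).contains "high_usage" then 2
       else if (ea.map (fun p => pvRating p.2)).all (fun r => r == "optimal" || r == "good") then 0
       else 1) := by
  induction ea with
  | nil => simp
  | cons h t ih =>
    simp only [List.foldl_cons, List.map_cons, List.contains_cons, List.all_cons]
    rw [pvFold_shift t _ (le_max_left _ _), max_eq_right (pvSeverity_nonneg _), ih]
    have e1 : (("concerning" : String) == pvRating h.2) = (pvRating h.2 == "concerning") := by
      simp [BEq.comm]
    have e2 : (("high_usage" : String) == pvRating h.2) = (pvRating h.2 == "high_usage") := by
      simp [BEq.comm]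
    rw [e1, e2]
    unfold pvSeverity
    exact pvMax_case _ _ _ _ _ _

-- the final label table agrees with A's branch chain, for any outcomes of the three tests
theorem pvLabel_case (X Y Z : Bool) :
    (if X = true then "needs_optimization"
     else if Y = true then "monitor_closely"
     else if Z = true then "excellent" else "good") =
      (PySem.List.pyGet? pvLabels
        (if X = true then (3:Int) else if Y = true then 2 else if Z = true then 0 else 1)).getD "" := by
  cases X <;> cases Y <;> cases Z <;> rfl

-- ===== VERDICT (by name: the statement is the Claim_ definition above) =====
theorem calculate_overall_efficiency_py_spec : Claim_equal_calculate_overall_efficiency_py := by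
  intro ea _ _
  unfold Spec_calculate_overall_efficiency_py calculate_overall_efficiency_py
    calculate_overall_efficiency_py_alt
  rw [pvWorst_char]
  exact pvLabel_case _ _ _
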